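-- pv_equiv track=rewrite | github.com/ctogle/dilapidator | src/dilap/geometry/polymath.py | bdissolvep
-- ===== SOURCE A (Python) =====
-- def bdissolvep(b,xs,rps):
--     nb = []
--     for y in range(len(b)):
--         if y in xs:
--             j = xs.index(y)
--             if rps[j] is None:continue
--             else:nb.extend(rps[j])
--         else:nb.append(b[y])
--         #nb.append(b[y])
--     return nb
-- ===== SOURCE B (Python) =====
-- def bdissolvep(b, xs, rps):
--     # run-slicing: map each in-range index to its replacement (first occurrence
--     # wins, matching xs.index), then stitch slices of b between the cut points.
--     rep = {}
--     for x, r in zip(xs, rps):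
--         if 0 <= x < len(b) and x not in rep:
--             rep[x] = r
--     nb = []
--     prev = 0
--     for k in sorted(rep):
--         nb += b[prev:k]
--         r = rep[k]
--         if r is not None:
--             nb += r
--         prev = k + 1
--     nb += b[prev:]
--     return nb
-- ===== Notes on version B (the rewrite author's own statement) =====
-- stated objective: faster
-- what changed: A scans xs twice per index of b (membership + .index) giving O(len(b)*len(xs)); B builds a first-occurrence dict from zip(xs,rps) once and stitches slices of b between the sorted cut points, O(len(b)+len(xs)+k log k).
import Mathlib
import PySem

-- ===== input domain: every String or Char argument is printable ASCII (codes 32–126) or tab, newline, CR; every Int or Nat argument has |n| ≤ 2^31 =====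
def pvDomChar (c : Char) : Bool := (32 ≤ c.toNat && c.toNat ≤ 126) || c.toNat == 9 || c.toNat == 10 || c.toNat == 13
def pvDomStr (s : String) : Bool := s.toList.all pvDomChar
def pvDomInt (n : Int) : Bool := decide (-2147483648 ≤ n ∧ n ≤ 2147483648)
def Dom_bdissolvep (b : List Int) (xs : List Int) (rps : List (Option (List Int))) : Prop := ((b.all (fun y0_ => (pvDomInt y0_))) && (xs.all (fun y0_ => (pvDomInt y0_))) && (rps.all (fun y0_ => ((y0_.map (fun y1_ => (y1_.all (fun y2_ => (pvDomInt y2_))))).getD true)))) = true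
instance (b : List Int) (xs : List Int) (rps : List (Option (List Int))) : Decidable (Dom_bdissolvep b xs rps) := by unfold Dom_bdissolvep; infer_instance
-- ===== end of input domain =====

-- B replaces A's per-index scan of xs (membership + .index per element of b) by a
-- first-occurrence dict built once from zip(xs,rps) plus run-slicing between sorted
-- cut points, an asymptotically faster algorithm with the same return value.


-- ===== PORT A =====
def bdissolvep (b : List Int) (xs : List Int) (rps : List (Option (List Int))) : List Int :=
  (PySem.List.pyRange 0 (b.length : Int) 1).foldl (fun nb y =>
    if y ∈ xs then
      match PySem.List.index? xs y with
      | some j =>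
        match PySem.List.pyGet? rps (j : Int) with
        | some none => nb                -- rps[j] is None: continue
        | some (some rp) => nb ++ rp     -- nb.extend(rps[j])
        | none => nb                     -- rps[j] IndexError: excluded by Pre_
      | none => nb                       -- unreachable: y ∈ xs
    else nb ++ [PySem.List.pyGetD b y 0] -- nb.append(b[y]); y is always in range
    ) []

-- ===== PORT B =====
-- first-occurrence dict of in-range cut points, from zip(xs, rps)
def pvRep (b : List Int) (xs : List Int) (rps : List (Option (List Int))) :
    PySem.Dict Int (Option (List Int)) :=
  (xs.zip rps).foldl (fun d p =>
      if 0 ≤ p.1 ∧ p.1 < (b.length : Int) ∧ d.contains p.1 = false then d.insert p.1 p.2 else d)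
    PySem.Dict.empty

-- one iteration of B's loop over the sorted cut points: slice up to k, then the replacement
def pvStep (b : List Int) (rep : PySem.Dict Int (Option (List Int)))
    (acc : List Int × Int) (k : Int) : List Int × Int :=
  let nb := acc.1 ++ PySem.List.slice b (some acc.2) (some k)
  let nb := match rep.get? k with
    | some (some r) => nb ++ r
    | _ => nb
  (nb, k + 1)

def bdissolvep_alt (b : List Int) (xs : List Int) (rps : List (Option (List Int))) : List Int :=
  let rep := pvRep b xs rps
  let st := (PySem.List.sorted rep.keys (fun k => k) false).foldl (pvStep b rep) ([], 0)
  st.1 ++ PySem.List.slice b (some st.2) none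

-- ===== PRECONDITION & SPEC =====
-- Pre_ excludes exactly the inputs where A raises IndexError: some in-range index y of b
-- whose first occurrence in xs sits at a position ≥ len(rps).
def Pre_bdissolvep (b : List Int) (xs : List Int) (rps : List (Option (List Int))) : Prop :=
  (PySem.List.pyRange 0 (b.length : Int) 1).all (fun y =>
    match PySem.List.index? xs y with
    | some j => decide (j < rps.length)
    | none => true) = true
instance (b : List Int) (xs : List Int) (rps : List (Option (List Int))) : Decidable (Pre_bdissolvep b xs rps) := by unfold Pre_bdissolvep; infer_instance

def pvWitness_bdissolvep : List Int × List Int × List (Option (List Int)) :=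
  ([10, 20, 30, 40], [1, 3, 1, -2], [some [7, 8], none, some [9]])

def Spec_bdissolvep (b : List Int) (xs : List Int) (rps : List (Option (List Int))) (out : List Int) : Prop := out = bdissolvep_alt b xs rps
instance (b : List Int) (xs : List Int) (rps : List (Option (List Int))) (out : List Int) : Decidable (Spec_bdissolvep b xs rps out) := by unfold Spec_bdissolvep; infer_instance

-- ===== CLAIM (what is proved, stated in full; the proofs are below) =====
def Claim_equal_bdissolvep : Prop := ∀ (b : List Int) (xs : List Int) (rps : List (Option (List Int))), Dom_bdissolvep b xs rps → Pre_bdissolvep b xs rps → Spec_bdissolvep b xs rps (bdissolvep b xs rps)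

-- ===== LEMMAS AND PROOFS =====

def pvSegA (b : List Int) (xs : List Int) (rps : List (Option (List Int))) (y : Int) : List Int :=
  match PySem.List.index? xs y with
  | some j =>
    match PySem.List.pyGet? rps (j : Int) with
    | some (some rp) => rp
    | _ => []
  | none => [PySem.List.pyGetD b y 0]

def pvSegR (b : List Int) (rep : PySem.Dict Int (Option (List Int))) (y : Int) : List Int :=
  match rep.get? y with
  | some (some r) => r
  | some none => []
  | none => [PySem.List.pyGetD b y 0]

theorem pvFold_get (n : Int) (ps : List (Int × Option (List Int))) :
    ∀ (d : PySem.Dict Int (Option (List Int))) (k : Int),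
    (ps.foldl (fun d p => if 0 ≤ p.1 ∧ p.1 < n ∧ d.contains p.1 = false then d.insert p.1 p.2 else d) d).get? k
    = match d.get? k with
      | some v => some v
      | none => if 0 ≤ k ∧ k < n then List.lookup k ps else none := by
  induction ps with
  | nil => intro d k; cases h : d.get? k <;> simp [h]
  | cons p ps ih =>
    intro d k
    simp only [List.foldl_cons]
    rw [ih]
    obtain ⟨a, v⟩ := p
    by_cases hc : 0 ≤ a ∧ a < n ∧ d.contains a = false
    · rw [if_pos hc]
      rw [PySem.Dict.get?_insert]
      by_cases hk : k = a
      · subst hk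
        have hnone : d.get? k = none := (PySem.Dict.get?_eq_none_iff_contains d k).mpr hc.2.2
        have hr : 0 ≤ k ∧ k < n := ⟨hc.1, hc.2.1⟩
        rw [if_pos rfl, hnone]
        simp [List.lookup, hr]
      · rw [if_neg hk]
        cases hd : d.get? k with
        | some v' => simp
        | none =>
          have hba : (k == a) = false := by simpa using hk
          simp [List.lookup, hba]
    · rw [if_neg hc]
      cases hd : d.get? k with
      | some v' => simp
      | none =>
        by_cases hk : k = a
        · subst hk
          have hcont : d.contains k = false := by
            rw [PySem.Dict.contains_eq_isSome_get?, hd]; rfl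
          have hrange : ¬ (0 ≤ k ∧ k < n) := fun h => hc ⟨h.1, h.2, hcont⟩
          rw [if_neg hrange, if_neg hrange]
        · have hba : (k == a) = false := by simpa using hk
          simp [List.lookup, hba]
theorem pvLookup_zip (xs : List Int) (rps : List (Option (List Int))) (y : Int) (j : Nat)
    (hidx : PySem.List.index? xs y = some j) (hj : j < rps.length) :
    List.lookup y (xs.zip rps) = rps[j]? := by
  induction xs generalizing rps j with
  | nil => simp [PySem.List.index?] at hidx
  | cons x xs ih =>
    cases rps with
    | nil => simp at hj
    | cons r rps =>
      by_cases hxy : x = y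
      · subst hxy
        rw [PySem.List.index?_cons_self] at hidx
        cases hidx; simp
      · rw [PySem.List.index?_cons_of_ne xs hxy] at hidx
        cases h' : PySem.List.index? xs y with
        | none => rw [h'] at hidx; simp at hidx
        | some j' =>
          rw [h'] at hidx
          simp at hidx
          subst hidx
          have hba : (y == x) = false := by simp; exact fun h => hxy h.symm
          simp only [List.zip_cons_cons, List.lookup, hba]
          rw [ih rps j' h' (by simpa using hj)]
          simp
theorem pvLookup_zip_none (xs : List Int) (rps : List (Option (List Int))) (y : Int)
    (hy : y ∉ xs) : List.lookup y (xs.zip rps) = none := by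
  induction xs generalizing rps with
  | nil => simp
  | cons x xs ih =>
    cases rps with
    | nil => simp
    | cons r rps =>
      have hba : (y == x) = false := by
        simp; intro h; exact hy (h ▸ List.mem_cons_self)
      simp only [List.zip_cons_cons, List.lookup, hba]
      exact ih rps (fun h => hy (List.mem_cons_of_mem _ h))
theorem pvMap_slice (b : List Int) (a c : Int) (h0 : 0 ≤ a) (hac : a ≤ c) (hc : c ≤ (b.length : Int)) :
    (PySem.List.pyRange a c 1).map (fun y => PySem.List.pyGetD b y 0) = PySem.List.slice b (some a) (some c) := by
  have h0c : 0 ≤ c := le_trans h0 hac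
  have e1 : (PySem.List.pyRange a (b.length : Int) 1).map (fun y => PySem.List.pyGetD b y 0) = b.drop a.toNat :=
    PySem.List.map_pyGetD_pyRange' b 0 h0
  have e2 : (PySem.List.pyRange c (b.length : Int) 1).map (fun y => PySem.List.pyGetD b y 0) = b.drop c.toNat :=
    PySem.List.map_pyGetD_pyRange' b 0 h0c
  rw [PySem.List.pyRange_one_append a c (b.length : Int) hac hc, List.map_append, e2] at e1
  have e3 : b.drop a.toNat = List.take (c.toNat - a.toNat) (b.drop a.toNat) ++ b.drop c.toNat := by
    have h4 : List.drop (c.toNat - a.toNat) (b.drop a.toNat) = b.drop c.toNat := by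
      rw [List.drop_drop]; congr 1; omega
    rw [← h4, List.take_append_drop]
  rw [e3] at e1
  have := List.append_inj_left' e1 rfl
  rw [this, PySem.List.slice_toNat b h0 h0c]
theorem pvFlatMap_segD (b : List Int) (rep : PySem.Dict Int (Option (List Int))) (lo hi : Int)
    (hnone : ∀ y ∈ PySem.List.pyRange lo hi 1, rep.get? y = none)
    (h0 : 0 ≤ lo) (hlh : lo ≤ hi) (hhi : hi ≤ (b.length : Int)) :
    (PySem.List.pyRange lo hi 1).flatMap (pvSegR b rep) = PySem.List.slice b (some lo) (some hi) := by
  have hcong : ∀ y ∈ PySem.List.pyRange lo hi 1, pvSegR b rep y = [PySem.List.pyGetD b y 0] := by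
    intro y hy; simp [pvSegR, hnone y hy]
  calc (PySem.List.pyRange lo hi 1).flatMap (pvSegR b rep)
      = ((PySem.List.pyRange lo hi 1).map (pvSegR b rep)).flatten := by rw [List.flatMap_def]
    _ = ((PySem.List.pyRange lo hi 1).map (fun y => [PySem.List.pyGetD b y 0])).flatten := by
        rw [List.map_congr_left hcong]
    _ = (PySem.List.pyRange lo hi 1).map (fun y => PySem.List.pyGetD b y 0) := by
        rw [← List.flatMap_def, ← List.map_eq_flatMap]
    _ = PySem.List.slice b (some lo) (some hi) := pvMap_slice b lo hi h0 hlh hhi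
theorem pvWalk (b : List Int) (rep : PySem.Dict Int (Option (List Int))) :
    ∀ (ks : List Int) (acc : List Int) (prev : Int), 0 ≤ prev → prev ≤ (b.length : Int) →
    ks.Pairwise (· < ·) →
    (∀ k ∈ ks, prev ≤ k ∧ k < (b.length : Int)) →
    (∀ y : Int, prev ≤ y → y < (b.length : Int) → ((rep.get? y).isSome ↔ y ∈ ks)) →
    (ks.foldl (pvStep b rep) (acc, prev)).1 ++
      PySem.List.slice b (some (ks.foldl (pvStep b rep) (acc, prev)).2) none
    = acc ++ (PySem.List.pyRange prev (b.length : Int) 1).flatMap (pvSegR b rep) := by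
  intro ks
  induction ks with
  | nil =>
    intro acc prev h0 hpn _ _ hiff
    simp only [List.foldl_nil]
    rw [PySem.List.slice_from b h0]
    have hfm : (PySem.List.pyRange prev (b.length : Int) 1).flatMap (pvSegR b rep)
        = PySem.List.slice b (some prev) (some (b.length : Int)) := by
      apply pvFlatMap_segD b rep prev _ _ h0 hpn le_rfl
      intro y hy
      rw [PySem.List.mem_pyRange_one] at hy
      cases hgy : rep.get? y with
      | none => rfl
      | some oy =>
        exfalso
        have h2 := (hiff y hy.1 hy.2).mp (by simp [hgy])
        simp at h2
    rw [hfm, PySem.List.slice_toNat b h0 (by positivity)]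
    congr 1
    rw [List.take_of_length_le]
    rw [List.length_drop]
    omega
  | cons k ks ih =>
    intro acc prev h0 hpn hpair hmem hiff
    obtain ⟨hlt, hpair'⟩ := List.pairwise_cons.mp hpair
    have hk := hmem k List.mem_cons_self
    have hsome : (rep.get? k).isSome := (hiff k hk.1 hk.2).mpr List.mem_cons_self
    cases hg : rep.get? k with
    | none => rw [hg] at hsome; simp at hsome
    | some o =>
      have hstep : pvStep b rep (acc, prev) k =
          (acc ++ PySem.List.slice b (some prev) (some k) ++ o.getD [], k + 1) := by
        cases o <;> simp [pvStep, hg]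
      rw [List.foldl_cons, hstep]
      rw [ih _ (k + 1) (by omega) (by omega) hpair'
        (fun k' hk' => ⟨by have := hlt k' hk'; omega, (hmem k' (List.mem_cons_of_mem _ hk')).2⟩)
        (fun y hy1 hy2 => by
          rw [hiff y (by omega) hy2, List.mem_cons]
          constructor
          · rintro (rfl | h)
            · omega
            · exact h
          · exact Or.inr)]
      have hfm1 : (PySem.List.pyRange prev k 1).flatMap (pvSegR b rep) = PySem.List.slice b (some prev) (some k) := by
        apply pvFlatMap_segD b rep prev k _ h0 hk.1 (by omega)
        intro y hy
        rw [PySem.List.mem_pyRange_one] at hy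
        have hnot : y ∉ k :: ks := by
          intro hmemy
          rcases List.mem_cons.mp hmemy with rfl | hmy
          · omega
          · have := hlt y hmy; omega
        have h2 := (hiff y hy.1 (by omega))
        cases hgy : rep.get? y with
        | none => rfl
        | some oy => rw [hgy] at h2; simp at h2; exact (hnot (List.mem_cons.mpr h2)).elim
      have hsegk : pvSegR b rep k = o.getD [] := by
        cases o <;> simp [pvSegR, hg]
      rw [PySem.List.pyRange_one_append prev k (b.length : Int) hk.1 (by omega),
          PySem.List.pyRange_one_append k (k + 1) (b.length : Int) (by omega) (by omega),
          List.flatMap_append, List.flatMap_append, PySem.List.pyRange_one_singleton,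
          List.flatMap_singleton, hfm1, hsegk]
      simp [List.append_assoc]
theorem pvA_eq_flatMap (b : List Int) (xs : List Int) (rps : List (Option (List Int))) :
    bdissolvep b xs rps = (PySem.List.pyRange 0 (b.length : Int) 1).flatMap (pvSegA b xs rps) := by
  unfold bdissolvep
  have h : (fun (nb : List Int) (y : Int) =>
      if y ∈ xs then
        match PySem.List.index? xs y with
        | some j =>
          match PySem.List.pyGet? rps (j : Int) with
          | some none => nb
          | some (some rp) => nb ++ rp
          | none => nb
        | none => nb
      else nb ++ [PySem.List.pyGetD b y 0])
      = (fun nb y => nb ++ pvSegA b xs rps y) := by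
    funext nb y
    by_cases hy : y ∈ xs
    · cases hidx : PySem.List.index? xs y with
      | none => exact absurd hy ((PySem.List.index?_eq_none_iff xs y).mp hidx)
      | some j =>
        cases hg : PySem.List.pyGet? rps (j : Int) with
        | none => simp only [pvSegA, hidx, hg, if_pos hy, List.append_nil]
        | some o => cases o <;> simp only [pvSegA, hidx, hg, if_pos hy, List.append_nil]
    · have hidx : PySem.List.index? xs y = none := (PySem.List.index?_eq_none_iff xs y).mpr hy
      simp only [pvSegA, hidx, if_neg hy]
  rw [h, PySem.List.foldl_append_eq_flatMap]
  simp
theorem pvRep_get? (b : List Int) (xs : List Int) (rps : List (Option (List Int))) (k : Int) :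
    (pvRep b xs rps).get? k =
      if 0 ≤ k ∧ k < (b.length : Int) then List.lookup k (xs.zip rps) else none := by
  unfold pvRep
  rw [pvFold_get]
  simp [PySem.Dict.get?_empty]
theorem pvRep_nodup_keys (b : List Int) (xs : List Int) (rps : List (Option (List Int))) :
    (pvRep b xs rps).keys.Nodup := by
  unfold pvRep
  generalize (xs.zip rps) = ps
  have : ∀ (d : PySem.Dict Int (Option (List Int))), d.keys.Nodup →
      (ps.foldl (fun d p => if 0 ≤ p.1 ∧ p.1 < (b.length : Int) ∧ d.contains p.1 = false then d.insert p.1 p.2 else d) d).keys.Nodup := by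
    induction ps with
    | nil => intro d hd; simpa using hd
    | cons p ps ih =>
      intro d hd
      simp only [List.foldl_cons]
      apply ih
      by_cases hc : 0 ≤ p.1 ∧ p.1 < (b.length : Int) ∧ d.contains p.1 = false
      · rw [if_pos hc]; exact PySem.Dict.nodup_keys_insert d p.1 p.2 hd
      · rw [if_neg hc]; exact hd
  exact this PySem.Dict.empty (by simp)
theorem pvSeg_eq (b : List Int) (xs : List Int) (rps : List (Option (List Int)))
    (hpre : Pre_bdissolvep b xs rps) (y : Int) (h0 : 0 ≤ y) (h1 : y < (b.length : Int)) :
    pvSegA b xs rps y = pvSegR b (pvRep b xs rps) y := by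
  have hget := pvRep_get? b xs rps y
  rw [if_pos ⟨h0, h1⟩] at hget
  by_cases hy : y ∈ xs
  · cases hidx : PySem.List.index? xs y with
    | none => exact absurd hy ((PySem.List.index?_eq_none_iff xs y).mp hidx)
    | some j =>
      have hj : j < rps.length := by
        unfold Pre_bdissolvep at hpre
        rw [List.all_eq_true] at hpre
        have hmem : y ∈ PySem.List.pyRange 0 (b.length : Int) 1 :=
          PySem.List.mem_pyRange_one.mpr ⟨h0, h1⟩
        have := hpre y hmem
        rw [hidx] at this
        simpa using this
      have hlook : List.lookup y (xs.zip rps) = rps[j]? := pvLookup_zip xs rps y j hidx hj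
      rw [hlook, List.getElem?_eq_getElem hj] at hget
      have hpg : PySem.List.pyGet? rps (j : Int) = some rps[j] := by
        simp [hj]
      simp only [pvSegA, pvSegR, hidx, hpg, hget]
      cases rps[j] <;> rfl
  · have hidx : PySem.List.index? xs y = none := (PySem.List.index?_eq_none_iff xs y).mpr hy
    rw [pvLookup_zip_none xs rps y hy] at hget
    simp only [pvSegA, pvSegR, hidx, hget]
theorem pvB_eq_flatMap (b : List Int) (xs : List Int) (rps : List (Option (List Int))) :
    bdissolvep_alt b xs rps
      = (PySem.List.pyRange 0 (b.length : Int) 1).flatMap (pvSegR b (pvRep b xs rps)) := by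
  unfold bdissolvep_alt
  simp only []
  set rep := pvRep b xs rps with hrep
  set ks := PySem.List.sorted rep.keys (fun k => k) false with hks
  have hnd : ks.Nodup :=
    ((PySem.List.sorted_perm rep.keys (fun k => k) false).nodup_iff).mpr (pvRep_nodup_keys b xs rps)
  have hle : ks.Pairwise (fun a b => a ≤ b) := PySem.List.sorted_pairwise rep.keys (fun k => k)
  have hlt : ks.Pairwise (· < ·) := (hle.and hnd).imp (fun h => lt_of_le_of_ne h.1 h.2)
  have hmemkeys : ∀ k, k ∈ ks ↔ (rep.get? k).isSome := by
    intro k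
    rw [PySem.List.mem_sorted]
    constructor
    · intro h
      cases hg : rep.get? k with
      | none => exact absurd ((PySem.Dict.get?_eq_none_iff_not_mem_keys rep k).mp hg) (by simp [h])
      | some o => rfl
    · intro h
      by_contra hmem
      rw [← PySem.Dict.get?_eq_none_iff_not_mem_keys] at hmem
      rw [hmem] at h
      simp at h
  have hrange : ∀ k ∈ ks, 0 ≤ k ∧ k < (b.length : Int) := by
    intro k hk
    have hs := (hmemkeys k).mp hk
    by_contra hr
    rw [hrep, pvRep_get? b xs rps k, if_neg hr] at hs
    simp at hs
  have := pvWalk b rep ks [] 0 le_rfl (by positivity) hlt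
    (fun k hk => ⟨(hrange k hk).1, (hrange k hk).2⟩)
    (fun y hy1 hy2 => (hmemkeys y).symm)
  simpa using this

-- ===== VERDICT (by name: the statement is the Claim_ definition above) =====
theorem bdissolvep_spec : Claim_equal_bdissolvep := by
  intro b xs rps _ hpre
  unfold Spec_bdissolvep
  rw [pvA_eq_flatMap, pvB_eq_flatMap, List.flatMap_def, List.flatMap_def]
  congr 1
  apply List.map_congr_left
  intro y hy
  rw [PySem.List.mem_pyRange_one] at hy
  exact pvSeg_eq b xs rps hpre y hy.1 hy.2
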